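-- pv_equiv track=rewrite | github.com/al3dwii/apisharayeh | src/app/services/llm_router.py | _extract_topic
-- ===== SOURCE A (Python) =====
-- def _extract_topic(prompt: str) -> str:
--     """Heuristic topic extractor from the last non-empty line of the prompt."""
--     lines = [l.strip() for l in prompt.splitlines() if l.strip()]
--     if not lines:
--         return "عرض تقديمي"
--     # Drop obvious instruction lines that mention JSON
--     for line in reversed(lines):
--         if "JSON" in line or "Return JSON" in line:
--             continue
--         # Trim very long lines
--         return line[:120]
--     return lines[-1][:120]
-- ===== SOURCE B (Python) =====
-- def _extract_topic(prompt: str) -> str: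
--     """Heuristic topic extractor from the last non-empty line of the prompt."""
--     lines = [l.strip() for l in prompt.splitlines() if l.strip()]
--     if not lines:
--         return "عرض تقديمي"
--     candidates = [l for l in lines if "JSON" not in l]
--     chosen = candidates[-1] if candidates else lines[-1]
--     return chosen[:120]
-- ===== Notes on version B (the rewrite author's own statement) =====
-- stated objective: simpler
-- what changed: Replaces the backward scan with early return (and its redundant 'Return JSON' check) by a forward filter building the candidate list once, then a single select-last-with-fallback and one slice at the end.
import Mathlib
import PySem

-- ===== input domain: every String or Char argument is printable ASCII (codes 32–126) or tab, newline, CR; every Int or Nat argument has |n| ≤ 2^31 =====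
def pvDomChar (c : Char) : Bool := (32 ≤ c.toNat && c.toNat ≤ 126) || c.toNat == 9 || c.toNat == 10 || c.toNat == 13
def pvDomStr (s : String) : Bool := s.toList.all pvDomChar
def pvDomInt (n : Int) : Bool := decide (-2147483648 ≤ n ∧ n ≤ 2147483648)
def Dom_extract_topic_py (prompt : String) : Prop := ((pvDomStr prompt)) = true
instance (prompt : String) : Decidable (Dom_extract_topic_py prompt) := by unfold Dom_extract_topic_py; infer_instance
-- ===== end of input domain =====

-- B replaces A's backward scan with early return (and redundant "Return JSON" test) by a forward
-- filter building the candidate list once, then select-last-with-fallback and one final slice (simpler).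

-- ===== PORT A =====
-- the backward scan: first line (from the end) not mentioning JSON, already sliced; none = loop fell through
def extract_topic_loopA : List String → Option String
  | [] => none
  | l :: rest =>
    if PySem.Str.isIn "JSON" l || PySem.Str.isIn "Return JSON" l then extract_topic_loopA rest
    else some (PySem.Str.slice l none (some 120))

def extract_topic_py (prompt : String) : String :=
  let lines := (PySem.Str.splitlines prompt).filterMap
    (fun l => let s := PySem.Str.strip l; if PySem.Str.len s = 0 then none else some s)
  if lines = [] then "عرض تقديمي"
  else
    match extract_topic_loopA lines.reverse with
    | some r => r
    | none => PySem.Str.slice (lines.getLastD "") none (some 120)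

-- ===== PORT B =====
def extract_topic_py_alt (prompt : String) : String :=
  let lines := (PySem.Str.splitlines prompt).filterMap
    (fun l => let s := PySem.Str.strip l; if PySem.Str.len s = 0 then none else some s)
  if lines = [] then "عرض تقديمي"
  else
    let candidates := lines.filter (fun l => ! PySem.Str.isIn "JSON" l)
    let chosen := match candidates.getLast? with
      | some c => c
      | none => lines.getLastD ""
    PySem.Str.slice chosen none (some 120)

-- ===== PRECONDITION & SPEC =====
def Spec_extract_topic_py (prompt : String) (out : String) : Prop := out = extract_topic_py_alt prompt
instance (prompt : String) (out : String) : Decidable (Spec_extract_topic_py prompt out) := by unfold Spec_extract_topic_py; infer_instance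

-- ===== CLAIM (what is proved, stated in full; the proofs are below) =====
def Claim_equal_extract_topic_py : Prop := ∀ (prompt : String), Dom_extract_topic_py prompt → Spec_extract_topic_py prompt (extract_topic_py prompt)

-- ===== LEMMAS AND PROOFS =====

-- "Return JSON" in l implies "JSON" in l, so A's disjunction collapses to the single test B uses
lemma cond_collapse (l : String) :
    (PySem.Str.isIn "JSON" l || PySem.Str.isIn "Return JSON" l) = PySem.Str.isIn "JSON" l := by
  cases h : PySem.Str.isIn "JSON" l with
  | true => simp
  | false =>
    simp only [Bool.false_or]
    rw [PySem.Str.isIn_eq] at h ⊢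
    rw [PySem.Chars.isIn_eq_false_iff] at h
    rw [PySem.Chars.isIn_eq_false_iff]
    intro hinf
    exact h (List.IsInfix.trans (by decide : "JSON".toList <:+: "Return JSON".toList) hinf)

-- A's loop is find?-then-slice
lemma loopA_eq_find (M : List String) :
    extract_topic_loopA M
      = (M.find? (fun l => ! PySem.Str.isIn "JSON" l)).map
          (fun l => PySem.Str.slice l none (some 120)) := by
  induction M with
  | nil => rfl
  | cons a M ih =>
    simp only [extract_topic_loopA, cond_collapse, List.find?]
    cases h : PySem.Str.isIn "JSON" a <;> simp [ih]

-- first match scanning backwards = last element of the forward filter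
lemma find?_reverse_eq_getLast_filter {α : Type} (p : α → Bool) (L : List α) :
    L.reverse.find? p = (L.filter p).getLast? := by
  induction L with
  | nil => rfl
  | cons a L ih =>
    rw [List.reverse_cons, List.find?_append, ih, List.filter_cons]
    by_cases h : p a = true
    · rw [if_pos h]
      cases hg : (L.filter p).getLast? with
      | some c => simp [List.find?, h, List.getLast?_cons, hg]
      | none =>
        have hnil : L.filter p = [] := List.getLast?_eq_none_iff.mp hg
        simp [List.find?, h, hnil]
    · rw [if_neg h]
      simp [List.find?, Bool.eq_false_iff.mpr h]

-- ===== VERDICT (by name: the statement is the Claim_ definition above) =====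
theorem extract_topic_py_spec : Claim_equal_extract_topic_py := by
  intro prompt _
  unfold Spec_extract_topic_py extract_topic_py extract_topic_py_alt
  set lines := (PySem.Str.splitlines prompt).filterMap
    (fun l => let s := PySem.Str.strip l; if PySem.Str.len s = 0 then none else some s) with hl
  by_cases h : lines = []
  · simp [h]
  · simp only [if_neg h, loopA_eq_find, find?_reverse_eq_getLast_filter]
    cases hg : (lines.filter (fun l => ! PySem.Str.isIn "JSON" l)).getLast? <;> simp
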